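-- pv_equiv track=rewrite | github.com/adampolak/first-fit | runs/results_numcolors/gen_199/original.py | _interleave_blocks
-- ===== SOURCE A (Python) =====
-- def _interleave_blocks(blocks, round_idx, interleave=True):
--     """Return an interleaved sequence of intervals from blocks; round-dependent order."""
--     if not interleave:
--         # flatten in block order
--         S = []
--         for blk in blocks:
--             S.extend(blk)
--         return S
--
--     maxlen = max((len(b) for b in blocks), default=0)
--     order = list(range(len(blocks)))
--     if round_idx % 2 == 1:
--         order = order[::-1]
--     # a subtle rotation to avoid stable overlap patterns
--     krot = round_idx % len(order)
--     order = order[krot:] + order[:krot]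
--
--     S = []
--     for i in range(maxlen):
--         for idx in order:
--             blk = blocks[idx]
--             if i < len(blk):
--                 S.append(blk[i])
--     return S
-- ===== SOURCE B (Python) =====
-- def _interleave_blocks(blocks, round_idx, interleave=True):
--     """Closed-form block order + head/tail transpose gather (no maxlen index loop)."""
--     if not interleave:
--         return [x for blk in blocks for x in blk]
--     n = len(blocks)
--     k = round_idx % n  # raises ZeroDivisionError on empty blocks, like A
--     odd = round_idx % 2 == 1
--     reordered = [blocks[n - 1 - (k + j) % n] if odd else blocks[(k + j) % n]
--                  for j in range(n)]
--     out = []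
--     while any(reordered):
--         out.extend(row[0] for row in reordered if row)
--         reordered = [row[1:] for row in reordered]
--     return out
-- ===== Notes on version B (the rewrite author's own statement) =====
-- stated objective: alternative
-- what changed: B replaces A's slice-built order list and maxlen-driven nested index loop by a closed-form rotated/reversed index formula ((k+j)%n, mirrored when round_idx is odd) and a head/tail transpose gather that repeatedly emits the heads of the nonempty rows and recurses on the tails.
import Mathlib
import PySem

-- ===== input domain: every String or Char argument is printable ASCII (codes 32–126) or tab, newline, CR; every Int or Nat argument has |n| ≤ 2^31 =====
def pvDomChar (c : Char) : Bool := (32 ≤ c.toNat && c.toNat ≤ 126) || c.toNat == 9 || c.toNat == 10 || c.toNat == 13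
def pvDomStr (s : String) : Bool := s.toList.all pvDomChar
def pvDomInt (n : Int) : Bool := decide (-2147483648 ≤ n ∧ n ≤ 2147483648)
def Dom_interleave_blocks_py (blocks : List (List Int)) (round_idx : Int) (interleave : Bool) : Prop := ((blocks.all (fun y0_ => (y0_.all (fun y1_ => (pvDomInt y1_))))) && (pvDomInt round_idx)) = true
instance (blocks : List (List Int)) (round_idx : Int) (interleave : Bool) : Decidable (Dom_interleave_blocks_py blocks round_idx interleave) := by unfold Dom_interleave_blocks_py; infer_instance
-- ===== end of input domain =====

-- B replaces A's maxlen-driven index interleave by a closed-form block order plus a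
-- head/tail transpose gather (objective: alternative, similar cost).

-- ===== PORT A =====
def interleave_blocks_py (blocks : List (List Int)) (round_idx : Int) (interleave : Bool) : List Int :=
  if interleave = false then
    blocks.foldl (fun S blk => S ++ blk) []
  else
    let maxlen : Nat := (PySem.List.max? (blocks.map List.length) (fun x => x)).getD 0
    let order0 : List Int := PySem.List.pyRange 0 (blocks.length : Int) 1
    let order1 : List Int := if PySem.Int.mod round_idx 2 = 1 then order0.reverse else order0
    let krot : Int := PySem.Int.mod round_idx (order1.length : Int)
    let order : List Int :=
      PySem.List.slice order1 (some krot) none ++ PySem.List.slice order1 none (some krot)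
    (List.range maxlen).foldl (fun S i =>
      order.foldl (fun S idx =>
        let blk := PySem.List.pyGetD blocks idx []   -- blocks[idx]; idx is always in range here
        if i < blk.length then S ++ [blk.getD i 0] else S) S) []

-- ===== PORT B =====
-- lemmas used by pyTransposeGather's termination proof (cited in decreasing_by)
lemma pvSumTailLe (u : List (List Int)) :
    ((u.map List.tail).map List.length).sum ≤ (u.map List.length).sum := by
  induction u with
  | nil => simp
  | cons b s ihs =>
    simp only [List.map_cons, List.sum_cons]
    have hb : b.tail.length ≤ b.length := by cases b <;> simp
    omega

lemma pvSumTailLt (rows : List (List Int)) (h : ¬ rows.all List.isEmpty = true) :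
    ((rows.map List.tail).map List.length).sum < (rows.map List.length).sum := by
  induction rows with
  | nil => simp at h
  | cons a t ih =>
    simp only [List.all_cons, Bool.and_eq_true] at h
    by_cases ha : a.isEmpty
    · have ht : ¬ t.all List.isEmpty = true := by tauto
      have hb : a.tail.length ≤ a.length := by cases a <;> simp
      have := ih ht
      simp only [List.map_cons, List.sum_cons]
      omega
    · have hb : a.tail.length < a.length := by
        cases a with
        | nil => simp at ha
        | cons x xs => simp
      have := pvSumTailLe t
      simp only [List.map_cons, List.sum_cons]
      omega

-- the 'while any(reordered)' loop of Source B: emit the present heads, recurse on the tails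
def pyTransposeGather (rows : List (List Int)) : List Int :=
  if h : rows.all List.isEmpty then []
  else (rows.filterMap List.head?) ++ pyTransposeGather (rows.map List.tail)
termination_by ((rows.map List.length).sum)
decreasing_by
  have key := pvSumTailLt rows h
  simpa using key

def interleave_blocks_py_alt (blocks : List (List Int)) (round_idx : Int) (interleave : Bool) : List Int :=
  if interleave = false then
    blocks.flatten
  else
    let n : Nat := blocks.length
    let k : Int := PySem.Int.mod round_idx (n : Int)
    let reordered : List (List Int) := (List.range n).map (fun (j : Nat) =>
      PySem.List.pyGetD blocks
        (if PySem.Int.mod round_idx 2 = 1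
         then (n : Int) - 1 - PySem.Int.mod (k + (j : Int)) (n : Int)
         else PySem.Int.mod (k + (j : Int)) (n : Int)) [])
    pyTransposeGather reordered

-- ===== PRECONDITION & SPEC =====
-- Pre_ excludes only interleave=True with an empty blocks list, where A raises
-- ZeroDivisionError on 'round_idx % len(order)' (B raises the same way).
def Pre_interleave_blocks_py (blocks : List (List Int)) (round_idx : Int) (interleave : Bool) : Prop :=
  interleave = true → blocks ≠ []
instance (blocks : List (List Int)) (round_idx : Int) (interleave : Bool) : Decidable (Pre_interleave_blocks_py blocks round_idx interleave) := by unfold Pre_interleave_blocks_py; infer_instance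

def pvWitness_interleave_blocks_py : List (List Int) × Int × Bool := ([[1, 2], [3]], 1, true)

def Spec_interleave_blocks_py (blocks : List (List Int)) (round_idx : Int) (interleave : Bool) (out : List Int) : Prop := out = interleave_blocks_py_alt blocks round_idx interleave
instance (blocks : List (List Int)) (round_idx : Int) (interleave : Bool) (out : List Int) : Decidable (Spec_interleave_blocks_py blocks round_idx interleave out) := by unfold Spec_interleave_blocks_py; infer_instance

-- ===== CLAIM (what is proved, stated in full; the proofs are below) =====
def Claim_equal_interleave_blocks_py : Prop := ∀ (blocks : List (List Int)) (round_idx : Int) (interleave : Bool), Dom_interleave_blocks_py blocks round_idx interleave → Pre_interleave_blocks_py blocks round_idx interleave → Spec_interleave_blocks_py blocks round_idx interleave (interleave_blocks_py blocks round_idx interleave)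

-- ===== LEMMAS AND PROOFS =====

-- A's inner loop over the order list appends the i-th column of the looked-up rows
lemma inner_loop_eq_col (blocks : List (List Int)) (ord : List Int) (i : Nat) (S : List Int) :
    ord.foldl (fun S idx =>
      let blk := PySem.List.pyGetD blocks idx []
      if i < blk.length then S ++ [blk.getD i 0] else S) S
    = S ++ (ord.map (fun idx => PySem.List.pyGetD blocks idx [])).filterMap (fun r => r[i]?) := by
  induction ord generalizing S with
  | nil => simp
  | cons idx rest ih =>
    simp only [List.foldl_cons, List.map_cons, List.filterMap_cons]
    by_cases hi : i < (PySem.List.pyGetD blocks idx []).length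
    · rw [if_pos hi, ih, List.getElem?_eq_getElem hi]
      simp [List.getD_eq_getElem?_getD, List.getElem?_eq_getElem hi]
    · rw [if_neg hi, ih, List.getElem?_eq_none (by omega)]

-- Nat: the running max of decremented values is the decremented running max
lemma foldl_max_sub_one (l : List Nat) (a : Nat) :
    (l.map (fun x => x - 1)).foldl max (a - 1) = l.foldl max a - 1 := by
  induction l generalizing a with
  | nil => simp
  | cons x t ih =>
    simp only [List.map_cons, List.foldl_cons]
    rw [show max (a - 1) (x - 1) = max a x - 1 by omega]
    exact ih (max a x)

-- the column gather up to the maximal length equals the head/tail transpose gather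
lemma flatMap_cols_eq_transpose (M : Nat) (rows : List (List Int))
    (hM : (rows.map List.length).foldl max 0 = M) :
    (List.range M).flatMap (fun i => rows.filterMap (fun r => r[i]?)) = pyTransposeGather rows := by
  induction M generalizing rows with
  | zero =>
    have hall : rows.all List.isEmpty = true := by
      simp only [List.all_eq_true, List.isEmpty_iff]
      intro r hr
      have := (PySem.List.le_foldl_max (rows.map List.length) 0).2 r.length
        (List.mem_map_of_mem hr)
      rw [hM] at this
      exact List.length_eq_zero_iff.mp (by omega)
    rw [pyTransposeGather, dif_pos hall]
    simp
  | succ M ih =>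
    have hmem : M + 1 ∈ rows.map List.length := by
      rcases PySem.List.foldl_max_mem (rows.map List.length) 0 with h0 | hm
      · omega
      · rwa [hM] at hm
    have hne : ¬ rows.all List.isEmpty = true := by
      simp only [List.all_eq_true, List.isEmpty_iff]
      intro hall
      rcases List.mem_map.mp hmem with ⟨r, hr, hlen⟩
      rw [hall r hr] at hlen
      simp at hlen
    rw [pyTransposeGather, dif_neg hne]
    rw [List.range_succ_eq_map, List.flatMap_cons, List.flatMap_map]
    have hcol0 : rows.filterMap (fun r => r[0]?) = rows.filterMap List.head? :=
      List.filterMap_congr (fun r _ => (List.head?_eq_getElem?).symm)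
    have hshift : ∀ i : Nat,
        rows.filterMap (fun r => r[i.succ]?) = (rows.map List.tail).filterMap (fun r => r[i]?) := by
      intro i
      rw [List.filterMap_map]
      exact List.filterMap_congr (fun r _ => by cases r <;> simp)
    have htails : ((rows.map List.tail).map List.length).foldl max 0 = M := by
      have h1 : (rows.map List.tail).map List.length = (rows.map List.length).map (fun x => x - 1) := by
        simp only [List.map_map]
        exact List.map_congr_left (fun r _ => by simp)
      rw [h1, show (0 : Nat) = 0 - 1 from rfl, foldl_max_sub_one, hM]
      omega
    rw [hcol0]
    congr 1
    calc (List.range M).flatMap (fun i => rows.filterMap (fun r => r[i.succ]?))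
        = (List.range M).flatMap (fun i => (rows.map List.tail).filterMap (fun r => r[i]?)) := by
          exact List.flatMap_congr (fun i _ => hshift i)
      _ = pyTransposeGather (rows.map List.tail) := ih _ htails

-- A's maxlen expression is the running max of the lengths
lemma maxlen_eq_foldl (l : List Nat) :
    (PySem.List.max? l (fun x => x)).getD 0 = l.foldl max 0 := by
  cases l with
  | nil => simp [PySem.List.max?]
  | cons x t =>
    rw [PySem.List.max?_id_cons]
    simp

-- the reversed-then-rotated order list of A, in B's closed form
lemma order_closed_form (n kt : Nat) (hn : 0 < n) (hk : kt < n) (odd : Prop) [Decidable odd] :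
    ((if odd then (PySem.List.pyRange 0 (n : Int) 1).reverse else PySem.List.pyRange 0 (n : Int) 1).drop kt
     ++ (if odd then (PySem.List.pyRange 0 (n : Int) 1).reverse else PySem.List.pyRange 0 (n : Int) 1).take kt)
    = (List.range n).map (fun j =>
        if odd then (n : Int) - 1 - (((kt + j) % n : Nat) : Int) else (((kt + j) % n : Nat) : Int)) := by
  have hblen : (if odd then (PySem.List.pyRange 0 (n : Int) 1).reverse else PySem.List.pyRange 0 (n : Int) 1).length = n := by
    split <;> simp [PySem.List.length_pyRange_one]
  have hbget : ∀ (m : Nat), m < n →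
      (if odd then (PySem.List.pyRange 0 (n : Int) 1).reverse else PySem.List.pyRange 0 (n : Int) 1)[m]?
      = some (if odd then ((n - 1 - m : Nat) : Int) else (m : Int)) := by
    intro m hm
    split
    · rw [List.getElem?_reverse (by simp [PySem.List.length_pyRange_one]; omega)]
      rw [PySem.List.length_pyRange_one, PySem.List.getElem?_pyRange_one]
      simp only [Int.sub_zero, Int.toNat_natCast]
      rw [if_pos (by omega)]
      congr 1
      omega
    · rw [PySem.List.getElem?_pyRange_one]
      rw [if_pos (by omega)]
      simp
  apply List.ext_getElem?
  intro i
  by_cases hi : i < n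
  · rw [List.getElem?_append, List.getElem?_drop, List.getElem?_take,
        List.length_drop, hblen]
    rw [List.getElem?_map, List.getElem?_range hi]
    by_cases hcase : i < n - kt
    · rw [if_pos (by omega), hbget (kt + i) (by omega)]
      have hmod : (kt + i) % n = kt + i := Nat.mod_eq_of_lt (by omega)
      simp only [Option.map_some]
      rw [hmod]
      split <;> (congr 1 <;> omega)
    · rw [if_neg (by omega), if_pos (by omega), hbget (i - (n - kt)) (by omega)]
      have hmod : (kt + i) % n = i - (n - kt) := by
        have h2 : kt + i = (i - (n - kt)) + 1 * n := by omega
        rw [h2, Nat.add_mul_mod_self_right]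
        exact Nat.mod_eq_of_lt (by omega)
      simp only [Option.map_some]
      rw [hmod]
      split <;> (congr 1 <;> omega)
  · rw [List.getElem?_eq_none (by
      simp only [List.length_append, List.length_drop, List.length_take]
      rw [hblen]
      omega)]
    rw [List.getElem?_eq_none (by simpa using hi)]

-- A's whole gather loop, over any order list whose looked-up rows permute blocks,
-- is the transpose gather of those rows
lemma gather_eq_transpose (blocks : List (List Int)) (ord : List Int)
    (hperm : (ord.map (fun idx => PySem.List.pyGetD blocks idx [])).Perm blocks) :
    (List.range ((blocks.map List.length).foldl max 0)).foldl
      (fun S i => ord.foldl (fun S idx =>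
        let blk := PySem.List.pyGetD blocks idx []
        if i < blk.length then S ++ [blk.getD i 0] else S) S) []
    = pyTransposeGather (ord.map (fun idx => PySem.List.pyGetD blocks idx [])) := by
  rw [PySem.List.foldl_congr_mem (List.range ((blocks.map List.length).foldl max 0))
      _ (fun S i => S ++ ((ord.map fun idx => PySem.List.pyGetD blocks idx []).filterMap (fun r => r[i]?))) ([] : List Int)
      (fun acc x _ => inner_loop_eq_col blocks ord x acc)]
  rw [PySem.List.foldl_append_eq_flatMap, List.nil_append]
  apply flatMap_cols_eq_transpose
  exact ((hperm.map List.length).foldl_eq 0)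

-- ===== VERDICT (by name: the statement is the Claim_ definition above) =====
theorem interleave_blocks_py_spec : Claim_equal_interleave_blocks_py := by
  intro blocks round_idx interleave hdom hpre
  unfold Spec_interleave_blocks_py
  cases interleave with
  | false =>
    simp [interleave_blocks_py, interleave_blocks_py_alt, PySem.List.foldl_append_eq_flatten]
  | true =>
    have hne : blocks ≠ [] := hpre rfl
    have hn : 0 < blocks.length := List.length_pos_iff.mpr hne
    have hnpos : (0 : Int) < (blocks.length : Int) := by exact_mod_cast hn
    simp only [interleave_blocks_py, interleave_blocks_py_alt, Bool.true_eq_false, if_false]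
    have hlen1 : (if PySem.Int.mod round_idx 2 = 1
        then (PySem.List.pyRange 0 (blocks.length : Int) 1).reverse
        else PySem.List.pyRange 0 (blocks.length : Int) 1).length = blocks.length := by
      split <;> simp [PySem.List.length_pyRange_one]
    rw [maxlen_eq_foldl, hlen1]
    have hkr0 : 0 ≤ PySem.Int.mod round_idx (blocks.length : Int) :=
      PySem.Int.mod_nonneg _ hnpos
    have hkrlt : PySem.Int.mod round_idx (blocks.length : Int) < (blocks.length : Int) :=
      PySem.Int.mod_lt _ hnpos
    have hktlt : (PySem.Int.mod round_idx (blocks.length : Int)).toNat < blocks.length := by omega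
    rw [PySem.List.slice_from _ hkr0, PySem.List.slice_to _ hkr0]
    rw [gather_eq_transpose blocks _ ?hperm]
    case hperm =>
      have hsplit : ((if PySem.Int.mod round_idx 2 = 1
          then (PySem.List.pyRange 0 (blocks.length : Int) 1).reverse
          else PySem.List.pyRange 0 (blocks.length : Int) 1).drop (PySem.Int.mod round_idx (blocks.length : Int)).toNat
          ++ (if PySem.Int.mod round_idx 2 = 1
          then (PySem.List.pyRange 0 (blocks.length : Int) 1).reverse
          else PySem.List.pyRange 0 (blocks.length : Int) 1).take (PySem.Int.mod round_idx (blocks.length : Int)).toNat).Perm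
          (PySem.List.pyRange 0 (blocks.length : Int) 1) := by
      -- rotation is a permutation; reversal is a permutation
        refine List.Perm.trans List.perm_append_comm ?_
        rw [List.take_append_drop]
        split
        · exact List.reverse_perm _
        · exact List.Perm.refl _
      refine List.Perm.trans (hsplit.map _) ?_
      rw [PySem.List.map_pyGetD_pyRange_zero']
    -- both sides are now a transpose gather; identify the row lists
    congr 1
    rw [order_closed_form blocks.length (PySem.Int.mod round_idx (blocks.length : Int)).toNat hn hktlt
        (PySem.Int.mod round_idx 2 = 1)]
    rw [List.map_map]
    refine List.map_congr_left (fun j hj => ?_)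
    have hjn : j < blocks.length := List.mem_range.mp hj
    have hmodcast : PySem.Int.mod (PySem.Int.mod round_idx (blocks.length : Int) + (j : Int)) (blocks.length : Int)
        = ((((PySem.Int.mod round_idx (blocks.length : Int)).toNat + j) % blocks.length : Nat) : Int) := by
      rw [PySem.Int.mod_eq_emod_of_pos hnpos]
      rw [show PySem.Int.mod round_idx (blocks.length : Int) = (((PySem.Int.mod round_idx (blocks.length : Int)).toNat : Nat) : Int) from (Int.toNat_of_nonneg hkr0).symm]
      rfl
    simp only [Function.comp_apply, hmodcast]
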